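-- pv_equiv track=rewrite | github.com/deadlykitten4/DICE | training/RL/sample/sdar_rl_rollout_kernel.py | sequential_select
-- ===== SOURCE A (Python) =====
-- def sequential_select(data_list, select_k, current_epoch, num_node, node_index):
--     total_data = len(data_list)
--     global_start = (current_epoch - 1) * select_k * num_node
--     node_start = global_start + node_index * select_k
--     actual_start = node_start % total_data
--
--     selected = []
--     for i in range(select_k):
--         idx = (actual_start + i) % total_data
--         selected.append(data_list[idx])
--
--     return selected
-- ===== SOURCE B (Python) =====
-- def sequential_select(data_list, select_k, current_epoch, num_node, node_index):
--     actual_start = ((current_epoch - 1) * num_node + node_index) * select_k % len(data_list)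
--     stop = actual_start + max(select_k, 0)
--     streamed = []
--     while len(streamed) < stop:
--         streamed += data_list
--     return streamed[actual_start:stop]
-- ===== Notes on version B (the rewrite author's own statement) =====
-- stated objective: alternative
-- what changed: Replaces the per-index loop with its modular lookups by streaming: repeatedly concatenate the whole list until the stream reaches actual_start+select_k elements, then return the slice [actual_start:stop] of the stream (and folds the start arithmetic into one expression).
import Mathlib
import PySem

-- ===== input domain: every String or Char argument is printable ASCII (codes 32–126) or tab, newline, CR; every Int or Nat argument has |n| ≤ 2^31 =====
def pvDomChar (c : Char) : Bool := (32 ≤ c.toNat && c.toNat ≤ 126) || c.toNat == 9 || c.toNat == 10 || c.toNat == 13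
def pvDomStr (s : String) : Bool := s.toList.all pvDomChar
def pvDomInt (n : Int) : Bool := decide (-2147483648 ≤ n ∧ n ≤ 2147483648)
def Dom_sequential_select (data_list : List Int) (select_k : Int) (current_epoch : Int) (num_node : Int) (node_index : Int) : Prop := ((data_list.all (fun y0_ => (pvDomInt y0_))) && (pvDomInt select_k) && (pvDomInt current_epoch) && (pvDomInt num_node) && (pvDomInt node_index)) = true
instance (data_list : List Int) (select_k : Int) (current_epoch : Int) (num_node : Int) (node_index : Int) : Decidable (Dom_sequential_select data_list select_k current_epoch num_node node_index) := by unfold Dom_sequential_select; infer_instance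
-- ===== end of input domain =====

-- B streams the list cyclically (concatenating whole copies until the stream is long enough)
-- and slices the window [actual_start:actual_start+select_k], instead of A's per-index modular
-- lookups; both raise ZeroDivisionError on the empty list (excluded by Pre_).

-- ===== PORT A =====
def sequential_select (data_list : List Int) (select_k : Int) (current_epoch : Int) (num_node : Int) (node_index : Int) : List Int :=
  let total_data : Int := (data_list.length : Int)
  let global_start := (current_epoch - 1) * select_k * num_node
  let node_start := global_start + node_index * select_k
  let actual_start := PySem.Int.mod node_start total_data
  -- data_list[idx]: idx = (actual_start + i) % total_data is always in range when data_list ≠ []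
  -- (Pre_), so pyGetD's default is never consulted on admitted inputs.
  (PySem.List.pyRange 0 select_k 1).foldl
    (fun selected i =>
      selected ++ [PySem.List.pyGetD data_list (PySem.Int.mod (actual_start + i) total_data) 0]) []

-- ===== PORT B =====
-- Python's 'while len(streamed) < stop: streamed += data_list'.  When data_list = [] and
-- 0 < stop the Python loop never terminates; that case is unreachable (the header raised
-- already), and the port returns the accumulator there to stay total.
def buildStream (dl : List Int) (stop : Nat) (streamed : List Int) : List Int :=
  if streamed.length < stop then
    if h : dl = [] then streamed
    else buildStream dl stop (streamed ++ dl)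
  else streamed
termination_by stop - streamed.length
decreasing_by
  have : 0 < dl.length := List.length_pos_iff.mpr h
  simp only [List.length_append]; omega

def sequential_select_alt (data_list : List Int) (select_k : Int) (current_epoch : Int) (num_node : Int) (node_index : Int) : List Int :=
  let actual_start := PySem.Int.mod (((current_epoch - 1) * num_node + node_index) * select_k)
                        (data_list.length : Int)
  let stop := actual_start + max select_k 0
  let streamed := buildStream data_list stop.toNat []
  PySem.List.slice streamed (some actual_start) (some stop)

-- ===== PRECONDITION & SPEC =====
-- Pre_ excludes only the empty list, on which Python's '% len(data_list)' raises ZeroDivisionError (in A and in B alike).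
def Pre_sequential_select (data_list : List Int) (select_k : Int) (current_epoch : Int) (num_node : Int) (node_index : Int) : Prop :=
  data_list ≠ []
instance (data_list : List Int) (select_k : Int) (current_epoch : Int) (num_node : Int) (node_index : Int) : Decidable (Pre_sequential_select data_list select_k current_epoch num_node node_index) := by unfold Pre_sequential_select; infer_instance
def pvWitness_sequential_select : List Int × Int × Int × Int × Int := ([3, 1, 4, 1, 5], 7, 2, 3, 1)

def Spec_sequential_select (data_list : List Int) (select_k : Int) (current_epoch : Int) (num_node : Int) (node_index : Int) (out : List Int) : Prop := out = sequential_select_alt data_list select_k current_epoch num_node node_index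
instance (data_list : List Int) (select_k : Int) (current_epoch : Int) (num_node : Int) (node_index : Int) (out : List Int) : Decidable (Spec_sequential_select data_list select_k current_epoch num_node node_index out) := by unfold Spec_sequential_select; infer_instance

-- ===== CLAIM (what is proved, stated in full; the proofs are below) =====
def Claim_equal_sequential_select : Prop := ∀ (data_list : List Int) (select_k : Int) (current_epoch : Int) (num_node : Int) (node_index : Int), Dom_sequential_select data_list select_k current_epoch num_node node_index → Pre_sequential_select data_list select_k current_epoch num_node node_index → Spec_sequential_select data_list select_k current_epoch num_node node_index (sequential_select data_list select_k current_epoch num_node node_index)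

-- ===== LEMMAS AND PROOFS =====

-- range(select_k) as a map over a Nat range (empty for select_k ≤ 0).
theorem pyRange_zero_toNat (k : Int) :
    PySem.List.pyRange 0 k 1 = List.map (fun i : Nat => (i : Int)) (List.range k.toNat) := by
  by_cases h : k ≤ 0
  · simp [PySem.List.pyRange, Int.toNat_of_nonpos h]
  · rw [show k = ((k.toNat : Nat) : Int) by omega, PySem.List.pyRange_zero_natCast, Int.toNat_natCast]

-- The stream built by B is long enough and is, position by position, the cyclic reading of dl.
theorem buildStream_spec (dl : List Int) (hd : dl ≠ []) :
    ∀ m stop streamed, stop - streamed.length = m →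
      dl.length ∣ streamed.length →
      (∀ j (h : j < streamed.length), streamed[j] = dl.getD (j % dl.length) 0) →
      stop ≤ (buildStream dl stop streamed).length ∧
        ∀ j (h : j < (buildStream dl stop streamed).length),
          (buildStream dl stop streamed)[j] = dl.getD (j % dl.length) 0 := by
  intro m
  induction m using Nat.strong_induction_on with
  | _ m ih =>
    intro stop streamed hm hdvd helem
    have hn : 0 < dl.length := List.length_pos_iff.mpr hd
    rw [buildStream]
    by_cases hlt : streamed.length < stop
    · simp only [hlt, if_true, hd, dif_neg, not_false_iff]
      apply ih (stop - (streamed ++ dl).length) (by simp [List.length_append]; omega)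
        stop (streamed ++ dl) rfl
      · simpa using hdvd
      · intro j hj
        by_cases hjs : j < streamed.length
        · rw [List.getElem_append_left hjs]; exact helem j hjs
        · rw [List.getElem_append_right (by omega)]
          obtain ⟨c, hc⟩ := hdvd
          have hr : j - streamed.length < dl.length := by
            simp only [List.length_append] at hj; omega
          have : j % dl.length = j - streamed.length := by
            rw [show j = dl.length * c + (j - streamed.length) by omega, Nat.mul_add_mod,
                Nat.mod_eq_of_lt hr]
            omega
          rw [this, List.getD_eq_getElem _ _ hr]
    · simp only [hlt, if_false]
      exact ⟨by omega, helem⟩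

-- ===== VERDICT (by name: the statement is the Claim_ definition above) =====
theorem sequential_select_spec : Claim_equal_sequential_select := by
  intro dl k e nn ni _ hpre
  unfold Spec_sequential_select sequential_select sequential_select_alt
  have hn : 0 < dl.length := List.length_pos_iff.mpr hpre
  have hnI : (0 : Int) < (dl.length : Int) := by exact_mod_cast hn
  have hns : ((e - 1) * k * nn) + ni * k = ((e - 1) * nn + ni) * k := by ring
  simp only [hns]
  set a := PySem.Int.mod (((e - 1) * nn + ni) * k) (dl.length : Int) with ha
  have ha0 : 0 ≤ a := PySem.Int.mod_nonneg _ hnI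
  set aN := a.toNat with haN
  have haS : a = (aN : Int) := by omega
  set K := (max k 0).toNat with hK
  have hkK : k.toNat = K := by omega
  have hstop : (a + max k 0).toNat = aN + K := by omega
  -- A side: the append-fold is a map over a Nat range of modular lookups
  rw [pyRange_zero_toNat, PySem.List.foldl_append_singleton_eq_map, List.map_map, List.nil_append,
      hkK]
  have hfun : ((fun i => PySem.List.pyGetD dl (PySem.Int.mod (a + i) (dl.length : Int)) 0) ∘
      fun i : Nat => (i : Int)) = fun i : Nat => dl.getD ((aN + i) % dl.length) 0 := by
    funext i
    simp only [Function.comp, haS]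
    rw [show ((aN : Int) + (i : Int)) = ((aN + i : Nat) : Int) by push_cast; ring,
        PySem.Int.mod_natCast, PySem.List.pyGetD_natCast]
  rw [hfun]
  -- B side: the stream is long enough, cyclic, and the slice has natural bounds
  obtain ⟨hlen, helem⟩ := buildStream_spec dl hpre _ ((a + max k 0).toNat) [] rfl (by simp) (by simp)
  rw [hstop] at hlen helem
  rw [show a + max k 0 = ((aN + K : Nat) : Int) by omega, haS, PySem.List.slice_natCast,
      Int.toNat_natCast]
  rw [show aN + K - aN = K by omega]
  -- elementwise comparison
  apply List.ext_getElem
  · simp only [List.length_map, List.length_range, List.length_take, List.length_drop]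
    omega
  · intro i h1 h2
    simp only [List.length_map, List.length_range] at h1
    rw [List.getElem_map, List.getElem_range, List.getElem_take, List.getElem_drop]
    exact (helem (aN + i) (by omega)).symm
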